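-- pv_equiv track=rewrite | github.com/fcastelasimao/quant-learning | projects/qframe/src/qframe/viz/charts.py | _factor_type_from_notes
-- ===== SOURCE A (Python) =====
-- def _factor_type_from_notes(notes: str | None) -> str:
--     if not notes:
--         return "unknown"
--     parts = str(notes).split("|")
--     for p in parts:
--         if p.startswith("factor_type="):
--             return p.split("=", 1)[1].strip()
--     return "unknown"
-- ===== SOURCE B (Python) =====
-- def _factor_type_from_notes(notes):
--     if not notes:
--         return "unknown"
--     kv = {}
--     for p in str(notes).split("|"):
--         pieces = p.split("=", 1)
--         if len(pieces) == 2: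
--             kv.setdefault(pieces[0], pieces[1])
--     v = kv.get("factor_type")
--     return v.strip() if v is not None else "unknown"
-- ===== Notes on version B (the rewrite author's own statement) =====
-- stated objective: alternative
-- what changed: Instead of scanning the split segments with startswith and an early return, B parses every segment once into a first-wins dict keyed by the text before the first equals sign (setdefault), and answers with a single dict lookup.
import Mathlib
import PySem

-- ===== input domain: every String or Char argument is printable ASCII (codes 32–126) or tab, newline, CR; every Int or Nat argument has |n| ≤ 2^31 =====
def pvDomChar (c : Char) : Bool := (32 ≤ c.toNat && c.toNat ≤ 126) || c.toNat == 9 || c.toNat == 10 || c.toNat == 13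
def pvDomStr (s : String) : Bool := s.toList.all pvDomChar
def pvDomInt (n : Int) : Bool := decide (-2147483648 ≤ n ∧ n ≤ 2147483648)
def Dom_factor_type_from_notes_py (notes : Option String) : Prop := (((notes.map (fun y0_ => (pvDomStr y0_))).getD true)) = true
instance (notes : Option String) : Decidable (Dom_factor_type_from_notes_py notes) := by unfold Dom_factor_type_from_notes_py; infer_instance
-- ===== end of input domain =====

-- B replaces the startswith scan over the segments by a one-pass 'k=v' dict build (first value per key) plus a single lookup; alternative decomposition, same cost.


-- ===== PORT A =====
-- loop "for p in parts: if p.startswith(...): return ..." as structural recursion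
def pvALoop : List String → String
  | [] => "unknown"
  | p :: rest =>
    if PySem.Str.startswith p "factor_type=" then
      -- p.split("=", 1)[1].strip(); the index 1 always exists here (p starts with "factor_type=")
      PySem.Str.strip ((((PySem.Str.splitMax? p "=" 1).getD []).getD 1 ""))
    else pvALoop rest

def factor_type_from_notes_py (notes : Option String) : String :=
  match notes with
  | none => "unknown"                 -- "if not notes" on None
  | some s =>
    if s = "" then "unknown"          -- "if not notes" on the empty string
    else pvALoop ((PySem.Str.split? s "|").getD [])

-- ===== PORT B =====
def pvBStep (d : PySem.Dict String String) (p : String) : PySem.Dict String String :=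
  let pieces := (PySem.Str.splitMax? p "=" 1).getD []
  if pieces.length = 2 then d.setdefault (pieces.getD 0 "") (pieces.getD 1 "") else d

def factor_type_from_notes_py_alt (notes : Option String) : String :=
  match notes with
  | none => "unknown"
  | some s =>
    if s = "" then "unknown"
    else
      let kv := ((PySem.Str.split? s "|").getD []).foldl pvBStep PySem.Dict.empty
      match kv.get? "factor_type" with
      | some v => PySem.Str.strip v
      | none => "unknown"

-- ===== PRECONDITION & SPEC =====
def Spec_factor_type_from_notes_py (notes : Option String) (out : String) : Prop := out = factor_type_from_notes_py_alt notes
instance (notes : Option String) (out : String) : Decidable (Spec_factor_type_from_notes_py notes out) := by unfold Spec_factor_type_from_notes_py; infer_instance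

-- ===== CLAIM (what is proved, stated in full; the proofs are below) =====
def Claim_equal_factor_type_from_notes_py : Prop := ∀ (notes : Option String), Dom_factor_type_from_notes_py notes → Spec_factor_type_from_notes_py notes (factor_type_from_notes_py notes)

-- ===== LEMMAS AND PROOFS =====

-- go with maxsplit budget 0: everything left is one final piece
lemma pvGoM0 (fuel : Nat) : ∀ (t cur : List Char) (acc : List (List Char)),
    PySem.Chars.splitOnMax.go ['='] fuel 0 t cur acc = ((cur.reverse ++ t) :: acc).reverse := by
  induction fuel with
  | zero => intro t cur acc; simp [PySem.Chars.splitOnMax.go]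
  | succ f ih =>
    intro t cur acc
    cases t with
    | nil => simp [PySem.Chars.splitOnMax.go]
    | cons c rest => simp [PySem.Chars.splitOnMax.go]

-- no '=' in l: one single piece
lemma pvGoNoSep (fuel : Nat) : ∀ (l cur : List Char) (acc : List (List Char)), '=' ∉ l →
    PySem.Chars.splitOnMax.go ['='] fuel 1 l cur acc = ((cur.reverse ++ l) :: acc).reverse := by
  induction fuel with
  | zero => intro l cur acc h; simp [PySem.Chars.splitOnMax.go]
  | succ f ih =>
    intro l cur acc h
    cases l with
    | nil => simp [PySem.Chars.splitOnMax.go]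
    | cons c rest =>
      have hc : c ≠ '=' := fun hc => h (hc ▸ List.mem_cons_self ..)
      have hpre : List.isPrefixOf ['='] (c :: rest) = false := by
        simp [List.isPrefixOf]; exact fun hh => (hc hh.symm).elim
      rw [PySem.Chars.splitOnMax.go]
      simp only [hpre, if_neg (by norm_num : ¬ (1 = 0)), Bool.false_eq_true, if_false]
      rw [ih rest (c :: cur) acc (fun hm => h (List.mem_cons_of_mem _ hm))]
      simp

-- enough fuel and a first '=' in the input: exactly two pieces
lemma pvGoSep (k : List Char) : ∀ (fuel : Nat) (t cur : List Char) (acc : List (List Char)),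
    '=' ∉ k → k.length + 1 ≤ fuel →
    PySem.Chars.splitOnMax.go ['='] fuel 1 (k ++ '=' :: t) cur acc
      = (t :: (cur.reverse ++ k) :: acc).reverse := by
  induction k with
  | nil =>
    intro fuel t cur acc _ hf
    match fuel, hf with
    | f + 1, _ =>
      simp only [List.nil_append]
      rw [PySem.Chars.splitOnMax.go]
      have hpre : List.isPrefixOf ['='] ('=' :: t) = true := by simp [List.isPrefixOf]
      simp only [hpre, if_neg (by norm_num : ¬ (1 = 0)), if_true]
      rw [show (1 : Nat) - 1 = 0 from rfl]
      rw [pvGoM0]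
      simp
  | cons c k' ih =>
    intro fuel t cur acc h hf
    match fuel, hf with
    | f + 1, hf =>
      have hc : c ≠ '=' := fun hc => h (hc ▸ List.mem_cons_self ..)
      have hpre : List.isPrefixOf ['='] (c :: (k' ++ '=' :: t)) = false := by
        simp [List.isPrefixOf]; exact fun hh => (hc hh.symm).elim
      simp only [List.cons_append]
      rw [PySem.Chars.splitOnMax.go]
      simp only [hpre, if_neg (by norm_num : ¬ (1 = 0)), Bool.false_eq_true, if_false]
      rw [ih f t (c :: cur) acc (fun hm => h (List.mem_cons_of_mem _ hm)) (by simpa using Nat.succ_le_succ_iff.mp hf)]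
      simp

-- decompose a list at its FIRST '='
lemma pvFirstEq (l : List Char) (h : '=' ∈ l) : ∃ k t, l = k ++ '=' :: t ∧ '=' ∉ k := by
  induction l with
  | nil => cases h
  | cons c rest ih =>
    by_cases hc : c = '='
    · exact ⟨[], rest, by simp [hc], by simp⟩
    · obtain ⟨k, t, hkt, hnk⟩ := ih (by
        rcases List.mem_cons.mp h with h1 | h2
        · exact absurd h1.symm hc
        · exact h2)
      exact ⟨c :: k, t, by simp [hkt], by
        intro hm
        rcases List.mem_cons.mp hm with h1 | h2
        · exact hc h1.symm
        · exact hnk h2⟩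

lemma pvSplitEq (p : String) :
    (PySem.Str.splitMax? p "=" 1).getD []
      = (PySem.Chars.splitOnMax.go ['='] (p.toList.length + 1) 1 p.toList [] []).map String.ofList := by
  simp [PySem.Str.splitMax?, PySem.Chars.splitMax?, PySem.Chars.splitOnMax]

lemma pvK0NoEq : '=' ∉ "factor_type".toList := by decide

lemma pvPieces_of_startswith (p : String) (h : PySem.Str.startswith p "factor_type=" = true) :
    ∃ t : String, (PySem.Str.splitMax? p "=" 1).getD [] = ["factor_type", t] := by
  have hpre : "factor_type=".toList <+: p.toList := by
    simpa [PySem.Str.startswith, PySem.Chars.startswith, List.isPrefixOf_iff_prefix] using h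
  obtain ⟨t, ht⟩ := hpre
  have hfe : "factor_type=".toList = "factor_type".toList ++ ['='] := by decide
  have hdec : p.toList = "factor_type".toList ++ '=' :: t :=
    ht.symm.trans (by rw [hfe]; simp)
  refine ⟨String.ofList t, ?_⟩
  rw [pvSplitEq, hdec, pvGoSep _ _ _ _ _ pvK0NoEq (by simp)]
  simp

lemma pvPieces_of_not_startswith (p : String) (h : PySem.Str.startswith p "factor_type=" = false) :
    ¬ (((PySem.Str.splitMax? p "=" 1).getD []).length = 2 ∧
       ((PySem.Str.splitMax? p "=" 1).getD []).getD 0 "" = "factor_type") := by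
  by_cases hm : '=' ∈ p.toList
  · obtain ⟨k, t, hkt, hnk⟩ := pvFirstEq p.toList hm
    rw [pvSplitEq, hkt, pvGoSep _ _ _ _ _ hnk (by simp)]
    rintro ⟨-, hk⟩
    have hk' : k = "factor_type".toList := by
      have := congrArg String.toList hk
      simpa [String.toList_ofList] using this
    have : PySem.Str.startswith p "factor_type=" = true := by
      simp only [PySem.Str.startswith, PySem.Chars.startswith, List.isPrefixOf_iff_prefix]
      exact ⟨t, by
        rw [hkt, hk', show "factor_type=".toList = "factor_type".toList ++ ['='] from by decide]
        simp⟩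
    rw [this] at h; cases h
  · rw [pvSplitEq, pvGoNoSep _ _ _ _ hm]
    simp

-- scanning the segments with startswith equals building the first-wins dict and looking up
lemma pvKey (parts : List String) : ∀ (d : PySem.Dict String String),
    (match (parts.foldl pvBStep d).get? "factor_type" with
      | some v => PySem.Str.strip v
      | none => "unknown")
    = match d.get? "factor_type" with
      | some v => PySem.Str.strip v
      | none => pvALoop parts := by
  induction parts with
  | nil => intro d; cases hd : d.get? "factor_type" <;> simp [hd, pvALoop]
  | cons p rest ih =>
    intro d
    rw [List.foldl_cons, ih (pvBStep d p)]
    by_cases hsw : PySem.Str.startswith p "factor_type=" = true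
    · obtain ⟨t, hp⟩ := pvPieces_of_startswith p hsw
      have hstep : pvBStep d p = d.setdefault "factor_type" t := by
        simp [pvBStep, hp]
      rw [hstep, PySem.Dict.get?_setdefault_self]
      have hloop : pvALoop (p :: rest) = PySem.Str.strip t := by
        rw [pvALoop, hsw]
        simp [hp]
      rw [hloop]
      cases d.get? "factor_type" <;> simp
    · have hsw' : PySem.Str.startswith p "factor_type=" = false := by
        simpa using hsw
      have hget : (pvBStep d p).get? "factor_type" = d.get? "factor_type" := by
        have hnp := pvPieces_of_not_startswith p hsw'
        unfold pvBStep
        by_cases hl : ((PySem.Str.splitMax? p "=" 1).getD []).length = 2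
        · simp only [hl, if_true]
          exact PySem.Dict.get?_setdefault_of_ne _ _ (fun he => hnp ⟨hl, he.symm⟩)
        · simp [hl]
      rw [hget]
      have hloop : pvALoop (p :: rest) = pvALoop rest := by
        rw [pvALoop, hsw']
        simp
      rw [hloop]

-- ===== VERDICT (by name: the statement is the Claim_ definition above) =====
theorem factor_type_from_notes_py_spec : Claim_equal_factor_type_from_notes_py := by
  intro notes _
  unfold Spec_factor_type_from_notes_py factor_type_from_notes_py factor_type_from_notes_py_alt
  match notes with
  | none => rfl
  | some s =>
    by_cases hs : s = ""
    · simp [hs]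
    · simp only [hs, if_false]
      have hk := pvKey ((PySem.Str.split? s "|").getD []) PySem.Dict.empty
      have he : (PySem.Dict.empty : PySem.Dict String String).get? "factor_type" = none := by
        simp [PySem.Dict.empty, PySem.Dict.get?]
      rw [he] at hk
      exact hk.symm
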